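-- pv_equiv track=rewrite | github.com/marian37/advent-of-code-2025 | 08.py | part2
-- ===== SOURCE A (Python) =====
-- def get_box_dist(box1, box2):
--     return (
--         (box1[0] - box2[0]) ** 2 + (box1[1] - box2[1]) ** 2 + (box1[2] - box2[2]) ** 2
--     )
--
-- def get_dist(input):
--     dist = []
--     for i in range(len(input)):
--         for j in range(i + 1, len(input)):
--             dist.append((get_box_dist(input[i], input[j]), i, j))
--     dist.sort(key=lambda triple: triple[0])
--     return dist
--
-- def part2(input):
--     dist = get_dist(input)
--     circuits = [i for i in range(len(input))]
--     for _, i, j in dist: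
--         ci = circuits[i]
--         cj = circuits[j]
--         mx = max(ci, cj)
--         mn = min(ci, cj)
--         if mx != mn:
--             for k in range(len(circuits)):
--                 if circuits[k] == mx:
--                     circuits[k] = mn
--         if max(circuits) == 0:
--             return input[i][0] * input[j][0]
--     return None
-- ===== SOURCE B (Python) =====
-- def part2(input):
--     n = len(input)
--     edges = []
--     for i in range(n):
--         for j in range(i + 1, n):
--             d = (
--                 (input[i][0] - input[j][0]) ** 2
--                 + (input[i][1] - input[j][1]) ** 2
--                 + (input[i][2] - input[j][2]) ** 2
--             )
--             edges.append((d, i, j))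
--     edges.sort(key=lambda t: t[0])
--     label = list(range(n))
--     # reverse index: current component label -> list of its vertices
--     # (a replaced label mx is never used again, so its stale entry is never read)
--     members = {i: [i] for i in range(n)}
--     count = n  # number of components
--     for _, i, j in edges:
--         ci = label[i]
--         cj = label[j]
--         if ci != cj:
--             mn, mx = (ci, cj) if ci < cj else (cj, ci)
--             for v in members[mx]:
--                 label[v] = mn
--             members[mn] = members[mn] + members[mx]
--             count -= 1
--             if count == 1:
--                 return input[i][0] * input[j][0]
--     return None
-- ===== Notes on version B (the rewrite author's own statement) =====
-- stated objective: faster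
-- what changed: A rescans the whole label array on every merge and calls max() over all labels after every edge (O(n) per edge); B keeps a component counter and a label-to-members reverse index, relabelling only the vertices of the absorbed component, so the per-edge work after sorting is O(1) plus the absorbed component's size.
import Mathlib
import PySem

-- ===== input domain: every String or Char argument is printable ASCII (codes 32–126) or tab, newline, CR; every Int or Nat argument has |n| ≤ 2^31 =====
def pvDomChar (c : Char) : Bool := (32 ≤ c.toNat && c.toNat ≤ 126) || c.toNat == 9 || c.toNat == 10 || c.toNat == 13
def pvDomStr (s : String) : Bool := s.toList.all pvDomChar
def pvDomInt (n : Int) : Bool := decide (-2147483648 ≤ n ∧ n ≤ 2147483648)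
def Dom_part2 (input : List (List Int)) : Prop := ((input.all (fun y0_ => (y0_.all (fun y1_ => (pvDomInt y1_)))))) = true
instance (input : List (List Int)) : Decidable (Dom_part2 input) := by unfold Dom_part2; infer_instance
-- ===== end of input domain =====

-- B replaces A's per-edge max() scan and full-array relabel by a component counter and a
-- label → members reverse index, relabelling only the vertices of the absorbed component.

-- ===== PORT A =====
def pvBoxDist (box1 box2 : List Int) : Int :=
  (PySem.List.pyGetD box1 0 0 - PySem.List.pyGetD box2 0 0) ^ 2
  + (PySem.List.pyGetD box1 1 0 - PySem.List.pyGetD box2 1 0) ^ 2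
  + (PySem.List.pyGetD box1 2 0 - PySem.List.pyGetD box2 2 0) ^ 2

def pvGetDist (input : List (List Int)) : List (Int × Int × Int) :=
  let dist : List (Int × Int × Int) :=
    (PySem.List.pyRange 0 (PySem.List.len input) 1).foldl (fun acc i =>
      (PySem.List.pyRange (i + 1) (PySem.List.len input) 1).foldl (fun acc2 j =>
        acc2 ++ [(pvBoxDist (PySem.List.pyGetD input i []) (PySem.List.pyGetD input j []), i, j)]) acc) []
  PySem.List.sorted dist (fun triple => triple.1) false

def pvLoopA (input : List (List Int)) : List (Int × Int × Int) → List Int → Option Int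
  | [], _ => none
  | (_, i, j) :: rest, circuits =>
    let ci := PySem.List.pyGetD circuits i 0
    let cj := PySem.List.pyGetD circuits j 0
    let mx := max ci cj
    let mn := min ci cj
    let circuits' :=
      if mx ≠ mn then
        (PySem.List.pyRange 0 (PySem.List.len circuits) 1).foldl
          (fun c k => if PySem.List.pyGetD c k 0 == mx then PySem.List.pySetD c k mn else c) circuits
      else circuits
    -- max(circuits) raises on an empty list in Python; with an edge present the list is nonempty
    if PySem.List.max? circuits' (fun x => x) = some 0 then
      some (PySem.List.pyGetD (PySem.List.pyGetD input i []) 0 0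
            * PySem.List.pyGetD (PySem.List.pyGetD input j []) 0 0)
    else pvLoopA input rest circuits'

def part2 (input : List (List Int)) : Option Int :=
  pvLoopA input (pvGetDist input) (PySem.List.pyRange 0 (PySem.List.len input) 1)

-- ===== PORT B =====
def pvLoopB (input : List (List Int)) :
    List (Int × Int × Int) → List Int → PySem.Dict Int (List Int) → Int → Option Int
  | [], _, _, _ => none
  | (_, i, j) :: rest, label, members, count =>
    let ci := PySem.List.pyGetD label i 0
    let cj := PySem.List.pyGetD label j 0
    if ci ≠ cj then
      let mn := if ci < cj then ci else cj
      let mx := if ci < cj then cj else ci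
      let label' := (members.getD mx []).foldl (fun l v => PySem.List.pySetD l v mn) label
      let members' := members.insert mn (members.getD mn [] ++ members.getD mx [])
      if count - 1 = 1 then
        some (PySem.List.pyGetD (PySem.List.pyGetD input i []) 0 0
              * PySem.List.pyGetD (PySem.List.pyGetD input j []) 0 0)
      else pvLoopB input rest label' members' (count - 1)
    else pvLoopB input rest label members count

def part2_alt (input : List (List Int)) : Option Int :=
  let n : Int := PySem.List.len input
  let edges := PySem.List.sorted
    ((PySem.List.pyRange 0 n 1).flatMap (fun i =>
      (PySem.List.pyRange (i + 1) n 1).map (fun j =>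
        ((PySem.List.pyGetD (PySem.List.pyGetD input i []) 0 0
            - PySem.List.pyGetD (PySem.List.pyGetD input j []) 0 0) ^ 2
         + (PySem.List.pyGetD (PySem.List.pyGetD input i []) 1 0
            - PySem.List.pyGetD (PySem.List.pyGetD input j []) 1 0) ^ 2
         + (PySem.List.pyGetD (PySem.List.pyGetD input i []) 2 0
            - PySem.List.pyGetD (PySem.List.pyGetD input j []) 2 0) ^ 2, i, j))))
    (fun t => t.1) false
  pvLoopB input edges (PySem.List.pyRange 0 n 1)
    ((PySem.List.pyRange 0 n 1).foldl (fun d i => d.insert i [i]) PySem.Dict.empty) n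

-- ===== PRECONDITION & SPEC =====
-- Pre_ excludes exactly the inputs on which A raises IndexError: with at least two boxes,
-- some box having fewer than three coordinates.
def Pre_part2 (input : List (List Int)) : Prop :=
  input.length ≤ 1 ∨ ∀ r ∈ input, 3 ≤ r.length
instance (input : List (List Int)) : Decidable (Pre_part2 input) := by unfold Pre_part2; infer_instance
def pvWitness_part2 : List (List Int) := [[0, 0, 0], [1, 2, 3]]

def Spec_part2 (input : List (List Int)) (out : Option Int) : Prop := out = part2_alt input
instance (input : List (List Int)) (out : Option Int) : Decidable (Spec_part2 input out) := by unfold Spec_part2; infer_instance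

-- ===== CLAIM (what is proved, stated in full; the proofs are below) =====
def Claim_equal_part2 : Prop := ∀ (input : List (List Int)), Dom_part2 input → Pre_part2 input → Spec_part2 input (part2 input)

-- ===== LEMMAS AND PROOFS =====

-- the relabelling map both programs apply to the label array on a merge
def pvF (mx mn x : Int) : Int := if x = mx then mn else x


-- joint invariant: B's members dict is the reverse index of A's circuits array,
-- B's count is the number of distinct labels, labels are nonnegative and bounded by their index
def pvInv (n : Int) (cs : List Int) (members : PySem.Dict Int (List Int)) (count : Int) : Prop :=
  ((cs.length : Int) = n) ∧
  (∀ v : Int, 0 ≤ v → v < n → 0 ≤ PySem.List.pyGetD cs v 0 ∧ PySem.List.pyGetD cs v 0 ≤ v) ∧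
  (count = (cs.toFinset.card : Int)) ∧
  (∀ r ∈ cs, ∀ v : Int, v ∈ members.getD r [] ↔ (0 ≤ v ∧ v < n ∧ PySem.List.pyGetD cs v 0 = r))


lemma setfold_length (S : List Int) (mn : Int) : ∀ (l : List Int),
    (S.foldl (fun l v => PySem.List.pySetD l v mn) l).length = l.length := by
  induction S with
  | nil => intro l; rfl
  | cons v S ih =>
      intro l
      simp only [List.foldl_cons]
      rw [ih]
      exact PySem.List.length_pySetD l v mn

lemma setfold_getD (S : List Int) (mn : Int) : ∀ (l : List Int),
    (∀ v ∈ S, 0 ≤ v ∧ v < (l.length : Int)) → ∀ (w : Int), 0 ≤ w → w < (l.length : Int) →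
    PySem.List.pyGetD (S.foldl (fun l v => PySem.List.pySetD l v mn) l) w 0
      = if w ∈ S then mn else PySem.List.pyGetD l w 0 := by
  induction S with
  | nil => intro l _ w _ _; simp
  | cons v S ih =>
      intro l hS w hw0 hw1
      obtain ⟨hv0, hv1⟩ := hS v (by simp)
      simp only [List.foldl_cons]
      have hlen : ((PySem.List.pySetD l v mn).length : Int) = (l.length : Int) := by
        rw [PySem.List.length_pySetD]
      rw [ih (PySem.List.pySetD l v mn)
          (by intro x hx; rw [hlen]; exact hS x (by simp [hx]))
          w hw0 (by rw [hlen]; exact hw1)]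
      have hset : PySem.List.pyGetD (PySem.List.pySetD l v mn) w 0
          = if w = v then mn else PySem.List.pyGetD l w 0 := by
        rw [PySem.List.pySetD_of_nonneg l mn hv0, PySem.List.pyGetD_of_nonneg _ 0 hw0]
        have hwlt : w.toNat < l.length := by omega
        have hvlt : v.toNat < l.length := by omega
        rw [List.getD_eq_getElem _ _ (by simpa using hwlt)]
        rw [List.getElem_set]
        by_cases h : w = v
        · simp [h]
        · have : v.toNat ≠ w.toNat := by omega
          rw [if_neg this, PySem.List.pyGetD_of_nonneg _ 0 hw0,
            List.getD_eq_getElem _ _ hwlt, if_neg h]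
      rw [hset]
      by_cases h1 : w ∈ S
      · simp [h1]
      · by_cases h2 : w = v <;> simp [h1, h2]


lemma relabelB (S l : List Int) (mx mn : Int)
    (hmem : ∀ v : Int, v ∈ S ↔ (0 ≤ v ∧ v < (l.length : Int) ∧ PySem.List.pyGetD l v 0 = mx)) :
    S.foldl (fun l v => PySem.List.pySetD l v mn) l = l.map (pvF mx mn) := by
  apply List.ext_getElem
  · rw [setfold_length]; simp
  · intro k h1 h2
    have hk : k < l.length := by
      have := setfold_length S mn l; omega
    have hG : PySem.List.pyGetD (S.foldl (fun l v => PySem.List.pySetD l v mn) l) (k : Int) 0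
        = if (k : Int) ∈ S then mn else PySem.List.pyGetD l (k : Int) 0 := by
      apply setfold_getD S mn l
      · intro v hv; have := (hmem v).1 hv; exact ⟨this.1, this.2.1⟩
      · positivity
      · exact_mod_cast hk
    rw [PySem.List.pyGetD_natCast, List.getD_eq_getElem _ _ h1] at hG
    rw [hG]
    have hlk : PySem.List.pyGetD l (k : Int) 0 = l[k] := by
      rw [PySem.List.pyGetD_natCast, List.getD_eq_getElem _ _ hk]
    have hmem' : (k : Int) ∈ S ↔ l[k] = mx := by
      rw [hmem]
      constructor
      · rintro ⟨_, _, h⟩; rw [hlk] at h; exact h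
      · intro h; exact ⟨by positivity, by exact_mod_cast hk, by rw [hlk]; exact h⟩
    rw [List.getElem_map]
    unfold pvF
    by_cases h : l[k] = mx
    · simp [h, hmem'.2 h]
    · rw [if_neg h, if_neg (fun hh => h (hmem'.1 hh)), hlk]

lemma card_map_pvF (c : List Int) (mx mn : Int) (hmx : mx ∈ c) (hmn : mn ∈ c) (hne : mx ≠ mn) :
    (c.map (pvF mx mn)).toFinset = c.toFinset.erase mx := by
  ext x
  simp only [List.mem_toFinset, List.mem_map, Finset.mem_erase]
  constructor
  · rintro ⟨y, hy, rfl⟩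
    unfold pvF
    by_cases h : y = mx
    · simp only [h]
      exact ⟨Ne.symm hne, hmn⟩
    · rw [if_neg h]
      exact ⟨h, hy⟩
  · rintro ⟨hx, hxc⟩
    by_cases h : x = mn
    · exact ⟨mx, hmx, by simp [pvF, h]⟩
    · exact ⟨x, hxc, by simp [pvF, hx]⟩

lemma max?_zero_iff (c : List Int) (hne : c ≠ []) (hnn : ∀ x ∈ c, 0 ≤ x) :
    PySem.List.max? c (fun x => x) = some 0 ↔ ∀ x ∈ c, x = 0 := by
  constructor
  · intro h x hx
    have h1 := PySem.List.max?_isMax h x hx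
    have h2 := hnn x hx
    omega
  · intro h
    cases hm : PySem.List.max? c (fun x => x) with
    | none => exact absurd ((PySem.List.max?_eq_none_iff c _).1 hm) hne
    | some m =>
        have := h m (PySem.List.max?_mem hm)
        rw [this]
 
lemma all_zero_iff_card_one (c : List Int) (h0 : (0 : Int) ∈ c) :
    (∀ x ∈ c, x = 0) ↔ c.toFinset.card = 1 := by
  constructor
  · intro h
    have : c.toFinset = {0} := by
      ext x
      simp only [List.mem_toFinset, Finset.mem_singleton]
      exact ⟨fun hx => h x hx, fun hx => hx ▸ h0⟩
    rw [this]; rfl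
  · intro h x hx
    obtain ⟨a, ha⟩ := Finset.card_eq_one.1 h
    have hxa := ha ▸ List.mem_toFinset.2 hx
    have h0a := ha ▸ List.mem_toFinset.2 h0
    simp only [Finset.mem_singleton] at hxa h0a
    omega

lemma init_members_getD (n r : Int) :
    ((PySem.List.pyRange 0 n 1).foldl (fun d i => d.insert i [i]) PySem.Dict.empty).getD r []
      = if 0 ≤ r ∧ r < n then [r] else [] := by
  have hitems := PySem.Dict.items_foldl_insert_fresh (ν := List Int)
      (PySem.List.pyRange 0 n 1) (fun i => i) (fun i => [i]) PySem.Dict.empty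
      (fun a _ => PySem.Dict.contains_empty a)
      (by simpa using PySem.List.nodup_pyRange_one 0 n)
  by_cases h : 0 ≤ r ∧ r < n
  · rw [if_pos h]
    apply PySem.Dict.getD_of_mem_items
    · rw [hitems]
      simp only [PySem.Dict.empty, List.nil_append, List.mem_map]
      exact ⟨r, PySem.List.mem_pyRange_one.2 ⟨h.1, h.2⟩, rfl⟩
    · exact PySem.Dict.nodup_keys_foldl_insert _ _ _ PySem.Dict.nodup_keys_empty
  · rw [if_neg h]
    apply PySem.Dict.getD_of_not_contains
    have hkeys := PySem.Dict.keys_foldl_insert (ν := List Int)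
      (PySem.List.pyRange 0 n 1) (fun _ x => [x]) PySem.Dict.empty
    have : r ∉ ((PySem.List.pyRange 0 n 1).foldl (fun d x => d.insert x [x]) PySem.Dict.empty).keys := by
      rw [hkeys]
      intro hmem
      have hupd : PySem.Set.update (PySem.Dict.empty (κ := Int) (ν := List Int)).keys (PySem.List.pyRange 0 n 1)
          = PySem.Set.ofList (PySem.List.pyRange 0 n 1) := by
        rw [PySem.Set.ofList_eq_foldl]; rfl
      rw [hupd] at hmem
      exact h (PySem.List.mem_pyRange_one.1 ((PySem.Set.mem_ofList _ r).1 hmem))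
    rw [← Bool.not_eq_true]
    intro hc
    exact this ((PySem.Dict.contains_iff_mem_keys _ _).1 hc)

lemma relabelA_aux (mx mn : Int) (m : Nat) : ∀ (N : Nat) (cs : List Int) (a : Nat),
    cs.length = N → a + m = N →
    (PySem.List.pyRange (a : Int) (N : Int) 1).foldl
      (fun cc k => if PySem.List.pyGetD cc k 0 == mx then PySem.List.pySetD cc k mn else cc) cs
    = cs.take a ++ (cs.drop a).map (pvF mx mn) := by
  induction m with
  | zero =>
      intro N cs a h1 h2
      rw [PySem.List.pyRange_one_eq_nil (by omega)]
      rw [List.foldl_nil, List.take_of_length_le (by omega), List.drop_of_length_le (by omega)]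
      simp
  | succ m ih =>
      intro N cs a h1 h2
      have ha : a < N := by omega
      rw [PySem.List.pyRange_one_cons (by exact_mod_cast ha)]
      rw [List.foldl_cons]
      have haN : a < cs.length := by omega
      have hget : PySem.List.pyGetD cs (a : Int) 0 = cs[a] := by
        rw [PySem.List.pyGetD_natCast, List.getD_eq_getElem _ _ haN]
      have hcast : ((a : Int) + 1) = ((a + 1 : Nat) : Int) := by push_cast; ring
      have hdrop : cs.drop a = cs[a] :: cs.drop (a + 1) := List.drop_eq_getElem_cons haN
      have hta : (cs.take a).length = a := by simp; omega
      by_cases hcs : cs[a] = mx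
      · rw [hget, if_pos (by simp [hcs])]
        rw [PySem.List.pySetD_natCast]
        have hset : cs.set a mn = cs.take a ++ mn :: cs.drop (a + 1) := by
          simp [List.set_eq_take_append_cons_drop, haN]
        rw [hcast, ih N (cs.set a mn) (a + 1) (by simp [h1]) (by omega)]
        have h1' : a + 1 = (cs.take a).length + 1 := by omega
        have e1 : (cs.set a mn).take (a + 1) = cs.take a ++ [mn] := by
          rw [hset, h1', List.take_append]; simp
        have e2 : (cs.set a mn).drop (a + 1) = cs.drop (a + 1) := by
          rw [hset, h1', List.drop_append]; simp
        rw [e1, e2, hdrop]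
        simp [pvF, hcs]
      · rw [hget, if_neg (by simp [hcs])]
        rw [hcast, ih N cs (a + 1) h1 (by omega)]
        have htake : cs.take (a + 1) = cs.take a ++ [cs[a]] := by
          rw [List.take_add_one, List.getElem?_eq_getElem haN]; rfl
        rw [htake, hdrop]
        simp only [List.map_cons]
        rw [show pvF mx mn cs[a] = cs[a] from if_neg hcs]
        simp only [List.append_assoc, List.singleton_append]

lemma relabelA (cs : List Int) (mx mn : Int) :
    (PySem.List.pyRange 0 (PySem.List.len cs) 1).foldl
      (fun cc k => if PySem.List.pyGetD cc k 0 == mx then PySem.List.pySetD cc k mn else cc) cs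
    = cs.map (pvF mx mn) := by
  have h := relabelA_aux mx mn cs.length cs.length cs 0 rfl (by omega)
  simpa [PySem.List.len] using h


def pvAns (input : List (List Int)) (i j : Int) : Int :=
  PySem.List.pyGetD (PySem.List.pyGetD input i []) 0 0
    * PySem.List.pyGetD (PySem.List.pyGetD input j []) 0 0

lemma pvLoopA_cons (input : List (List Int)) (d i j : Int) (rest : List (Int × Int × Int)) (cs : List Int) :
    pvLoopA input ((d, i, j) :: rest) cs =
      (if PySem.List.max?
          (if max (PySem.List.pyGetD cs i 0) (PySem.List.pyGetD cs j 0)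
              ≠ min (PySem.List.pyGetD cs i 0) (PySem.List.pyGetD cs j 0) then
            (PySem.List.pyRange 0 (PySem.List.len cs) 1).foldl
              (fun c2 k => if PySem.List.pyGetD c2 k 0 == max (PySem.List.pyGetD cs i 0) (PySem.List.pyGetD cs j 0)
                then PySem.List.pySetD c2 k (min (PySem.List.pyGetD cs i 0) (PySem.List.pyGetD cs j 0)) else c2) cs
          else cs) (fun x => x) = some 0 then
        some (pvAns input i j)
      else pvLoopA input rest
        (if max (PySem.List.pyGetD cs i 0) (PySem.List.pyGetD cs j 0)
            ≠ min (PySem.List.pyGetD cs i 0) (PySem.List.pyGetD cs j 0) then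
          (PySem.List.pyRange 0 (PySem.List.len cs) 1).foldl
            (fun c2 k => if PySem.List.pyGetD c2 k 0 == max (PySem.List.pyGetD cs i 0) (PySem.List.pyGetD cs j 0)
              then PySem.List.pySetD c2 k (min (PySem.List.pyGetD cs i 0) (PySem.List.pyGetD cs j 0)) else c2) cs
        else cs)) := rfl

lemma pvLoopB_cons (input : List (List Int)) (d i j : Int) (rest : List (Int × Int × Int))
    (label : List Int) (members : PySem.Dict Int (List Int)) (count : Int) :
    pvLoopB input ((d, i, j) :: rest) label members count =
      (if PySem.List.pyGetD label i 0 ≠ PySem.List.pyGetD label j 0 then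
        (if count - 1 = 1 then
          some (pvAns input i j)
        else pvLoopB input rest
          ((members.getD (if PySem.List.pyGetD label i 0 < PySem.List.pyGetD label j 0
              then PySem.List.pyGetD label j 0 else PySem.List.pyGetD label i 0) []).foldl
            (fun l v => PySem.List.pySetD l v (if PySem.List.pyGetD label i 0 < PySem.List.pyGetD label j 0
              then PySem.List.pyGetD label i 0 else PySem.List.pyGetD label j 0)) label)
          (members.insert (if PySem.List.pyGetD label i 0 < PySem.List.pyGetD label j 0
              then PySem.List.pyGetD label i 0 else PySem.List.pyGetD label j 0)
            (members.getD (if PySem.List.pyGetD label i 0 < PySem.List.pyGetD label j 0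
                then PySem.List.pyGetD label i 0 else PySem.List.pyGetD label j 0) [] ++
             members.getD (if PySem.List.pyGetD label i 0 < PySem.List.pyGetD label j 0
                then PySem.List.pyGetD label j 0 else PySem.List.pyGetD label i 0) []))
          (count - 1))
      else pvLoopB input rest label members count) := rfl

lemma loop_eq (input : List (List Int)) (n : Int) :
    ∀ (dist : List (Int × Int × Int)) (cs : List Int) (members : PySem.Dict Int (List Int)) (count : Int),
    (∀ e ∈ dist, 0 ≤ e.2.1 ∧ e.2.1 < e.2.2 ∧ e.2.2 < n) →
    pvInv n cs members count → 2 ≤ count →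
    pvLoopA input dist cs = pvLoopB input dist cs members count := by
  intro dist
  induction dist with
  | nil => intro cs members count _ _ _; rfl
  | cons e rest ih =>
    obtain ⟨d, i, j⟩ := e
    intro cs members count hb hInv hcnt
    obtain ⟨hlen, hR, hC, hM⟩ := hInv
    have hbh := hb (d, i, j) (by simp)
    simp only at hbh
    obtain ⟨hi0, hij, hjn⟩ := hbh
    have hrest : ∀ e ∈ rest, 0 ≤ e.2.1 ∧ e.2.1 < e.2.2 ∧ e.2.2 < n := by
      intro e he; exact hb e (by simp [he])
    have hn2 : 2 ≤ n := by omega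
    have hcsne : cs ≠ [] := by
      intro h; rw [h] at hlen; simp at hlen; omega
    have hnn : ∀ x ∈ cs, 0 ≤ x := by
      intro x hx
      obtain ⟨k, hk, rfl⟩ := List.mem_iff_getElem.1 hx
      have := (hR (k : Int) (by positivity) (by exact_mod_cast hlen ▸ Int.ofNat_lt.2 hk)).1
      rwa [PySem.List.pyGetD_natCast, List.getD_eq_getElem _ _ hk] at this
    have h0mem : (0 : Int) ∈ cs := by
      have h := hR 0 le_rfl (by omega)
      have h0 : PySem.List.pyGetD cs 0 0 = 0 := by omega
      have hlt : (0 : Int) < (cs.length : Int) := by omega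
      rw [PySem.List.pyGetD_eq_getElem cs 0 le_rfl hlt] at h0
      rw [← h0]
      exact List.getElem_mem _
    have hcard2 : 2 ≤ cs.toFinset.card := by omega
    set ci := PySem.List.pyGetD cs i 0 with hci
    set cj := PySem.List.pyGetD cs j 0 with hcj
    have hci_mem : ci ∈ cs := by
      rw [hci, PySem.List.pyGetD_eq_getElem cs 0 hi0 (by omega)]
      exact List.getElem_mem _
    have hcj_mem : cj ∈ cs := by
      rw [hcj, PySem.List.pyGetD_eq_getElem cs 0 (by omega) (by omega)]
      exact List.getElem_mem _
    rw [pvLoopA_cons, pvLoopB_cons]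
    by_cases hecc : ci = cj
    · -- no merge on either side
      have hmaxmin : max ci cj = min ci cj := by omega
      have hnot0 : ¬ (PySem.List.max? cs (fun x => x) = some 0) := by
        intro h
        have := (all_zero_iff_card_one cs h0mem).1 ((max?_zero_iff cs hcsne hnn).1 h)
        omega
      rw [if_neg (not_not_intro hmaxmin), if_neg hnot0, if_neg (not_not_intro hecc)]
      exact ih cs members count hrest ⟨hlen, hR, hC, hM⟩ hcnt
    · -- merge
      have hmxmem : max ci cj ∈ cs := by rcases max_choice ci cj with h | h <;> rw [h] <;> assumption
      have hmnmem : min ci cj ∈ cs := by rcases min_choice ci cj with h | h <;> rw [h] <;> assumption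
      have hmnnn : 0 ≤ min ci cj := le_min (hnn ci hci_mem) (hnn cj hcj_mem)
      have hneq : max ci cj ≠ min ci cj := by omega
      have hmx0 : max ci cj ≠ 0 := by omega
      set mx := max ci cj with hmx
      set mn := min ci cj with hmn
      set cm := cs.map (pvF mx mn) with hcm
      have hBmn : (if ci < cj then ci else cj) = mn := by rw [hmn]; split <;> omega
      have hBmx : (if ci < cj then cj else ci) = mx := by rw [hmx]; split <;> omega
      have hfz : pvF mx mn 0 = 0 := by simp [pvF, Ne.symm hmx0]
      have hSmem : ∀ v : Int, v ∈ members.getD mx [] ↔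
          (0 ≤ v ∧ v < (cs.length : Int) ∧ PySem.List.pyGetD cs v 0 = mx) := by
        intro v; rw [hlen]; exact hM mx hmxmem v
      have hrelB := relabelB (members.getD mx []) cs mx mn hSmem
      have hgcm : ∀ v : Int, PySem.List.pyGetD cm v 0 = pvF mx mn (PySem.List.pyGetD cs v 0) := by
        intro v
        have h2 := PySem.List.pyGetD_map (pvF mx mn) cs v 0
        rw [hfz] at h2
        exact h2
      have hcmnn : ∀ x ∈ cm, 0 ≤ x := by
        intro x hx
        obtain ⟨y, hy, rfl⟩ := List.mem_map.1 hx
        unfold pvF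
        split
        · exact hmnnn
        · exact hnn y hy
      have hcmne : cm ≠ [] := by simp [hcm, hcsne]
      have h0cm : (0 : Int) ∈ cm := List.mem_map.2 ⟨0, h0mem, hfz⟩
      have hcardcm : cm.toFinset.card = cs.toFinset.card - 1 := by
        rw [hcm, card_map_pvF cs mx mn hmxmem hmnmem hneq]
        exact Finset.card_erase_of_mem (List.mem_toFinset.2 hmxmem)
      have htest : (PySem.List.max? cm (fun x => x) = some 0) ↔ (count - 1 = 1) := by
        rw [max?_zero_iff cm hcmne hcmnn, all_zero_iff_card_one cm h0cm, hcardcm]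
        omega
      have hmxnotin : mx ∉ cm := by
        rw [hcm]
        intro h
        obtain ⟨x, hx, hfx⟩ := List.mem_map.1 h
        by_cases hxe : x = mx
        · rw [hxe] at hfx; simp [pvF] at hfx; omega
        · simp [pvF, hxe] at hfx
      rw [if_pos hneq, if_pos hecc, hBmn, hBmx, hrelB, relabelA cs mx mn, ← hcm]
      by_cases hret : count - 1 = 1
      · rw [if_pos (htest.2 hret), if_pos hret]
      · rw [if_neg (fun h => hret (htest.1 h)), if_neg hret]
        apply ih cm _ (count - 1) hrest _ (by
          have hpos : 0 < cm.toFinset.card := by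
            rw [Finset.card_pos]
            exact ⟨0, List.mem_toFinset.2 h0cm⟩
          omega)
        refine ⟨by simp [hcm]; exact_mod_cast hlen, ?_, by push_cast [hcardcm]; omega, ?_⟩
        · intro v hv0 hv1
          rw [hgcm v]
          obtain ⟨h1, h2⟩ := hR v hv0 hv1
          unfold pvF
          split
          · constructor
            · exact hmnnn
            · omega
          · exact ⟨h1, h2⟩
        · intro r hrcm v
          rw [PySem.Dict.getD_insert]
          have hrmx : r ≠ mx := fun h => hmxnotin (h ▸ hrcm)
          by_cases hr : r = mn
          · subst hr
            rw [if_pos rfl, List.mem_append, hM mn hmnmem v, hM mx hmxmem v, hgcm v]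
            constructor
            · rintro (⟨h1, h2, h3⟩ | ⟨h1, h2, h3⟩)
              · exact ⟨h1, h2, by simp [pvF, h3, Ne.symm hneq]⟩
              · exact ⟨h1, h2, by simp [pvF, h3]⟩
            · rintro ⟨h1, h2, h3⟩
              unfold pvF at h3
              by_cases hx : PySem.List.pyGetD cs v 0 = mx
              · exact Or.inr ⟨h1, h2, hx⟩
              · rw [if_neg hx] at h3
                exact Or.inl ⟨h1, h2, h3⟩
          · rw [if_neg hr]
            have hrcs : r ∈ cs := by
              obtain ⟨x, hx, hfx⟩ := List.mem_map.1 (hcm ▸ hrcm)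
              by_cases hxe : x = mx
              · rw [hxe] at hfx; simp [pvF] at hfx; exact absurd hfx.symm hr
              · simp [pvF, hxe] at hfx; exact hfx ▸ hx
            rw [hM r hrcs v, hgcm v]
            constructor
            · rintro ⟨h1, h2, h3⟩
              refine ⟨h1, h2, ?_⟩
              rw [h3]
              simp [pvF, hrmx]
            · rintro ⟨h1, h2, h3⟩
              refine ⟨h1, h2, ?_⟩
              unfold pvF at h3
              by_cases hx : PySem.List.pyGetD cs v 0 = mx
              · rw [if_pos hx] at h3; exact absurd h3.symm hr
              · rw [if_neg hx] at h3; exact h3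

lemma edges_eq (input : List (List Int)) :
    pvGetDist input = PySem.List.sorted
      ((PySem.List.pyRange 0 (PySem.List.len input) 1).flatMap (fun i =>
        (PySem.List.pyRange (i + 1) (PySem.List.len input) 1).map (fun j =>
          ((PySem.List.pyGetD (PySem.List.pyGetD input i []) 0 0
              - PySem.List.pyGetD (PySem.List.pyGetD input j []) 0 0) ^ 2
           + (PySem.List.pyGetD (PySem.List.pyGetD input i []) 1 0
              - PySem.List.pyGetD (PySem.List.pyGetD input j []) 1 0) ^ 2
           + (PySem.List.pyGetD (PySem.List.pyGetD input i []) 2 0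
              - PySem.List.pyGetD (PySem.List.pyGetD input j []) 2 0) ^ 2, i, j))))
      (fun t => t.1) false := by
  unfold pvGetDist
  rw [PySem.List.foldl_congr_mem (PySem.List.pyRange 0 (PySem.List.len input) 1) _
    (fun acc i => acc ++ (PySem.List.pyRange (i + 1) (PySem.List.len input) 1).map
      (fun j => (pvBoxDist (PySem.List.pyGetD input i []) (PySem.List.pyGetD input j []), i, j))) []
    (fun acc i _ => PySem.List.foldl_append_singleton_eq_map _ _ _)]
  rw [PySem.List.foldl_append_eq_flatMap]
  rfl


lemma init_inv (input : List (List Int)) (n : Int) (hn : n = PySem.List.len input) :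
    ((((PySem.List.pyRange 0 n 1).length : Int) = n) ∧
     (∀ v : Int, 0 ≤ v → v < n → 0 ≤ PySem.List.pyGetD (PySem.List.pyRange 0 n 1) v 0
        ∧ PySem.List.pyGetD (PySem.List.pyRange 0 n 1) v 0 ≤ v) ∧
     (n = (((PySem.List.pyRange 0 n 1).toFinset.card : Nat) : Int)) ∧
     (∀ r ∈ PySem.List.pyRange 0 n 1, ∀ v : Int,
        v ∈ ((PySem.List.pyRange 0 n 1).foldl (fun d i => d.insert i [i]) PySem.Dict.empty).getD r [] ↔
          (0 ≤ v ∧ v < n ∧ PySem.List.pyGetD (PySem.List.pyRange 0 n 1) v 0 = r))) := by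
  have hn0 : 0 ≤ n := by rw [hn, PySem.List.len_eq]; positivity
  have hlen : (((PySem.List.pyRange 0 n 1).length : Int) = n) := by
    rw [PySem.List.length_pyRange_one]; omega
  have hget : ∀ v : Int, 0 ≤ v → v < n → PySem.List.pyGetD (PySem.List.pyRange 0 n 1) v 0 = v := by
    intro v hv0 hv1
    rw [PySem.List.pyGetD_eq_getElem _ 0 hv0 (by omega)]
    rw [PySem.List.getElem_pyRange_one]
    omega
  refine ⟨hlen, fun v hv0 hv1 => by rw [hget v hv0 hv1]; omega, ?_, ?_⟩
  · rw [List.toFinset_card_of_nodup (PySem.List.nodup_pyRange_one 0 n)]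
    rw [PySem.List.length_pyRange_one]
    omega
  · intro r hr v
    have hrb := PySem.List.mem_pyRange_one.1 hr
    rw [init_members_getD n r, if_pos hrb]
    simp only [List.mem_singleton]
    constructor
    · rintro rfl
      exact ⟨hrb.1, hrb.2, hget v hrb.1 hrb.2⟩
    · rintro ⟨h1, h2, h3⟩
      rw [hget v h1 h2] at h3
      exact h3



lemma part2_eq_alt (input : List (List Int)) : part2 input = part2_alt input := by
  have hb : ∀ e ∈ pvGetDist input, 0 ≤ e.2.1 ∧ e.2.1 < e.2.2 ∧ e.2.2 < PySem.List.len input := by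
    intro e he
    rw [edges_eq, PySem.List.mem_sorted] at he
    obtain ⟨i, hi, he2⟩ := List.mem_flatMap.1 he
    obtain ⟨j, hj, rfl⟩ := List.mem_map.1 he2
    have h1 := PySem.List.mem_pyRange_one.1 hi
    have h2 := PySem.List.mem_pyRange_one.1 hj
    simp only
    omega
  show pvLoopA input (pvGetDist input) (PySem.List.pyRange 0 (PySem.List.len input) 1)
      = pvLoopB input _ (PySem.List.pyRange 0 (PySem.List.len input) 1)
          ((PySem.List.pyRange 0 (PySem.List.len input) 1).foldl
            (fun d i => d.insert i [i]) PySem.Dict.empty) (PySem.List.len input)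
  rw [← edges_eq]
  cases hE : pvGetDist input with
  | nil => rfl
  | cons e rest =>
      have hbe := hb e (by rw [hE]; simp)
      have hn2 : 2 ≤ PySem.List.len input := by omega
      obtain ⟨h1, h2, h3, h4⟩ := init_inv input (PySem.List.len input) rfl
      rw [← hE]
      exact loop_eq input (PySem.List.len input) (pvGetDist input) _ _ _ hb ⟨h1, h2, h3, h4⟩ hn2

-- ===== VERDICT (by name: the statement is the Claim_ definition above) =====
theorem part2_spec : Claim_equal_part2 := by
  intro input _ _
  unfold Spec_part2
  exact part2_eq_alt input
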